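-- pv_equiv track=rewrite | github.com/IKNOWINOT/Murphy-System | murphy_system/src/setup_wizard.py | _fuzzy_match_choice
-- ===== SOURCE A (Python) =====
-- from typing import Any, Dict, List, Optional
--
-- def _fuzzy_match_choice(raw: str, options: List[str]) -> Optional[str]:
--     """Try to extract a valid option from free-text input.
--
--     For example, ``"local for now."`` matches ``"local"`` when
--     ``options`` is ``["local", "groq", "openai", ...]``.
--     """
--     lower = raw.strip().lower()
--     # Exact match (case-insensitive)
--     for opt in options:
--         if lower == opt.lower():
--             return opt
--     # The input starts with a valid option followed by non-alpha chars or space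
--     for opt in options:
--         ol = opt.lower()
--         if lower.startswith(ol) and (
--             len(lower) == len(ol) or not lower[len(ol)].isalpha()
--         ):
--             return opt
--     # A valid option appears as a standalone word in the input
--     words = lower.replace(",", " ").replace(".", " ").split()
--     for opt in options:
--         if opt.lower() in words:
--             return opt
--     return None
-- ===== SOURCE B (Python) =====
-- def _fuzzy_match_choice(raw, options):
--     lower = raw.strip().lower()
--     words = lower.replace(",", " ").replace(".", " ").split()
--
--     def rank(opt):
--         ol = opt.lower()
--         if lower == ol:
--             return 0
--         if lower.startswith(ol) and (len(lower) == len(ol) or not lower[len(ol)].isalpha()):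
--             return 1
--         if ol in words:
--             return 2
--         return None
--
--     best = None  # (rank, option); earlier options win ties because we require r < best[0]
--     for opt in options:
--         r = rank(opt)
--         if r is not None and (best is None or r < best[0]):
--             best = (r, opt)
--     return None if best is None else best[1]
-- ===== Notes on version B (the rewrite author's own statement) =====
-- stated objective: alternative
-- what changed: A's three sequential scans over options (exact, then prefix-at-boundary, then standalone word) are replaced by one loop that ranks each option (0/1/2) and tracks the minimum (rank, index), with earlier options winning rank ties; the word list is computed once up front.
import Mathlib
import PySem

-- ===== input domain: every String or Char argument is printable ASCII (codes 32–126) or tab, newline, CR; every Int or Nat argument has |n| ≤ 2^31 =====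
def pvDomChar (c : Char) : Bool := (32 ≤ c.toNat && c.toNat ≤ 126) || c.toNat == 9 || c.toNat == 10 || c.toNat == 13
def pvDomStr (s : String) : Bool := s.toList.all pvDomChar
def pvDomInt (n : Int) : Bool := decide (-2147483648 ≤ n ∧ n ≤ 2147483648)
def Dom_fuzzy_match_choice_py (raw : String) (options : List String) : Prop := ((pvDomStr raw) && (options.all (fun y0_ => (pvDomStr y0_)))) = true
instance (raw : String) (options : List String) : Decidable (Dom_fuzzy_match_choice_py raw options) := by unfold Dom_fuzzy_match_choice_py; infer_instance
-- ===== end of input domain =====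

-- B replaces A's three sequential scans over `options` by a single loop that ranks each
-- option (0 = exact, 1 = prefix at a word boundary, 2 = standalone word) and keeps the
-- option with the smallest rank, earliest option winning ties (objective: alternative).

-- ===== PORT A =====
-- the three Python match conditions, shared verbatim by both ports
def cond0 (lower opt : String) : Bool := lower == PySem.Str.lower opt

def cond1 (lower opt : String) : Bool :=
  let ol := PySem.Str.lower opt
  PySem.Str.startswith lower ol &&
    ((PySem.Str.len lower == PySem.Str.len ol) ||
      -- lower[len(ol)].isalpha(): the index is in range whenever Python evaluates it
      (match PySem.Str.pyGet? lower (PySem.Str.len ol) with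
       | some c => !(PySem.Chars.isalpha c)
       | none => false))

def cond2 (words : List String) (opt : String) : Bool := words.contains (PySem.Str.lower opt)

def pyWords (lower : String) : List String :=
  PySem.Str.split₀ (PySem.Str.replace (PySem.Str.replace lower "," " ") "." " ")

def fuzzy_match_choice_py (raw : String) (options : List String) : Option String :=
  let lower := PySem.Str.lower (PySem.Str.strip raw)
  match options.find? (cond0 lower) with
  | some opt => some opt
  | none =>
    match options.find? (cond1 lower) with
    | some opt => some opt
    | none =>
      let words := pyWords lower
      match options.find? (cond2 words) with
      | some opt => some opt
      | none => none

-- ===== PORT B =====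
def rankOf (lower : String) (words : List String) (opt : String) : Option Nat :=
  if cond0 lower opt then some 0
  else if cond1 lower opt then some 1
  else if cond2 words opt then some 2
  else none

def bStep (lower : String) (words : List String) (best : Option (Nat × String))
    (opt : String) : Option (Nat × String) :=
  match rankOf lower words opt with
  | none => best
  | some r =>
    match best with
    | none => some (r, opt)
    | some b => if r < b.1 then some (r, opt) else some b

def fuzzy_match_choice_py_alt (raw : String) (options : List String) : Option String :=
  let lower := PySem.Str.lower (PySem.Str.strip raw)
  let words := pyWords lower
  match options.foldl (bStep lower words) none with
  | none => none
  | some b => some b.2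

-- ===== PRECONDITION & SPEC =====
def Spec_fuzzy_match_choice_py (raw : String) (options : List String) (out : Option String) : Prop := out = fuzzy_match_choice_py_alt raw options
instance (raw : String) (options : List String) (out : Option String) : Decidable (Spec_fuzzy_match_choice_py raw options out) := by unfold Spec_fuzzy_match_choice_py; infer_instance

-- ===== CLAIM (what is proved, stated in full; the proofs are below) =====
def Claim_equal_fuzzy_match_choice_py : Prop := ∀ (raw : String) (options : List String), Dom_fuzzy_match_choice_py raw options → Spec_fuzzy_match_choice_py raw options (fuzzy_match_choice_py raw options)

-- ===== LEMMAS AND PROOFS =====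
theorem foldl_bStep_zero (lw : String) (ws : List String) (x : String) :
    ∀ l : List String, l.foldl (bStep lw ws) (some (0, x)) = some (0, x) := by
  intro l
  induction l with
  | nil => rfl
  | cons o l ih =>
    have h : bStep lw ws (some (0, x)) o = some (0, x) := by
      unfold bStep; cases h : rankOf lw ws o <;> simp
    rw [List.foldl_cons, h, ih]

theorem foldl_bStep_one (lw : String) (ws : List String) (x : String) :
    ∀ l : List String, l.foldl (bStep lw ws) (some (1, x)) =
      (match l.find? (cond0 lw) with
       | some y => some (0, y)
       | none => some (1, x)) := by
  intro l
  induction l with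
  | nil => rfl
  | cons o l ih =>
    by_cases h0 : cond0 lw o
    · simp [List.foldl_cons, bStep, rankOf, h0, foldl_bStep_zero]
    · by_cases h1 : cond1 lw o <;> by_cases h2 : cond2 ws o <;>
        simp [List.foldl_cons, bStep, rankOf, h0, h1, h2, ih]

theorem foldl_bStep_two (lw : String) (ws : List String) (x : String) :
    ∀ l : List String, l.foldl (bStep lw ws) (some (2, x)) =
      (match l.find? (cond0 lw) with
       | some y => some (0, y)
       | none =>
         match l.find? (fun o => !cond0 lw o && cond1 lw o) with
         | some y => some (1, y)
         | none => some (2, x)) := by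
  intro l
  induction l with
  | nil => rfl
  | cons o l ih =>
    by_cases h0 : cond0 lw o
    · simp [List.foldl_cons, bStep, rankOf, h0, foldl_bStep_zero]
    · by_cases h1 : cond1 lw o
      · simp [List.foldl_cons, bStep, rankOf, h0, h1, foldl_bStep_one]
      · by_cases h2 : cond2 ws o <;>
          simp [List.foldl_cons, bStep, rankOf, h0, h1, h2, ih]

theorem foldl_bStep_none (lw : String) (ws : List String) :
    ∀ l : List String, l.foldl (bStep lw ws) none =
      (match l.find? (cond0 lw) with
       | some y => some (0, y)
       | none =>
         match l.find? (fun o => !cond0 lw o && cond1 lw o) with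
         | some y => some (1, y)
         | none =>
           match l.find? (fun o => !cond0 lw o && !cond1 lw o && cond2 ws o) with
           | some z => some ((2 : Nat), z)
           | none => none) := by
  intro l
  induction l with
  | nil => rfl
  | cons o l ih =>
    by_cases h0 : cond0 lw o
    · simp [List.foldl_cons, bStep, rankOf, h0, foldl_bStep_zero]
    · by_cases h1 : cond1 lw o
      · simp [List.foldl_cons, bStep, rankOf, h0, h1, foldl_bStep_one]
      · by_cases h2 : cond2 ws o
        · simp [List.foldl_cons, bStep, rankOf, h0, h1, h2, foldl_bStep_two]
        · simp [List.foldl_cons, bStep, rankOf, h0, h1, h2, ih]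

theorem find?_ext {α : Type} (p q : α → Bool) :
    ∀ l : List α, (∀ x ∈ l, p x = q x) → l.find? p = l.find? q := by
  intro l
  induction l with
  | nil => intro _; rfl
  | cons o l ih =>
    intro h
    have ho := h o (by simp)
    simp only [List.find?_cons, ho]
    cases hq : q o
    · simp [ih (fun x hx => h x (by simp [hx]))]
    · rfl

-- ===== VERDICT (by name: the statement is the Claim_ definition above) =====
theorem fuzzy_match_choice_py_spec : Claim_equal_fuzzy_match_choice_py := by
  intro raw options _
  unfold Spec_fuzzy_match_choice_py fuzzy_match_choice_py fuzzy_match_choice_py_alt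
  simp only [foldl_bStep_none]
  cases h0 : options.find? (cond0 (PySem.Str.lower (PySem.Str.strip raw))) with
  | some y => simp
  | none =>
    have h0' : ∀ o ∈ options, cond0 (PySem.Str.lower (PySem.Str.strip raw)) o = false := by
      simpa using List.find?_eq_none.mp h0
    rw [find?_ext (fun o => !cond0 (PySem.Str.lower (PySem.Str.strip raw)) o &&
          cond1 (PySem.Str.lower (PySem.Str.strip raw)) o)
          (cond1 (PySem.Str.lower (PySem.Str.strip raw))) options
          (fun o ho => by simp [h0' o ho])]
    cases h1 : options.find? (cond1 (PySem.Str.lower (PySem.Str.strip raw))) with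
    | some y => simp
    | none =>
      have h1' : ∀ o ∈ options, cond1 (PySem.Str.lower (PySem.Str.strip raw)) o = false := by
        simpa using List.find?_eq_none.mp h1
      rw [find?_ext (fun o => !cond0 (PySem.Str.lower (PySem.Str.strip raw)) o &&
            !cond1 (PySem.Str.lower (PySem.Str.strip raw)) o &&
            cond2 (pyWords (PySem.Str.lower (PySem.Str.strip raw))) o)
            (cond2 (pyWords (PySem.Str.lower (PySem.Str.strip raw)))) options
            (fun o ho => by simp [h0' o ho, h1' o ho])]
      cases h2 : options.find? (cond2 (pyWords (PySem.Str.lower (PySem.Str.strip raw)))) <;> simp
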